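-- pv_equiv track=rewrite | github.com/acharkq/HLCP | utilities/DataSet.py | count_sen_length
-- ===== SOURCE A (Python) =====
-- def count_sen_length(sentence):
--     sentence = sentence[::-1]
--     sen_len = len(sentence)
--     for word in sentence:
--         if word == 0:
--             sen_len -= 1
--         else:
--             break
--     return sen_len
-- ===== SOURCE B (Python) =====
-- def count_sen_length(sentence):
--     result = 0
--     for i, word in enumerate(sentence):
--         if word != 0:
--             result = i + 1
--     return result
-- ===== Notes on version B (the rewrite author's own statement) =====
-- stated objective: simpler
-- what changed: Instead of reversing the list and decrementing the length while scanning trailing zeros with a break, B makes one forward pass recording last-nonzero-index + 1 (no reversed copy, no break).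
import Mathlib
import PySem

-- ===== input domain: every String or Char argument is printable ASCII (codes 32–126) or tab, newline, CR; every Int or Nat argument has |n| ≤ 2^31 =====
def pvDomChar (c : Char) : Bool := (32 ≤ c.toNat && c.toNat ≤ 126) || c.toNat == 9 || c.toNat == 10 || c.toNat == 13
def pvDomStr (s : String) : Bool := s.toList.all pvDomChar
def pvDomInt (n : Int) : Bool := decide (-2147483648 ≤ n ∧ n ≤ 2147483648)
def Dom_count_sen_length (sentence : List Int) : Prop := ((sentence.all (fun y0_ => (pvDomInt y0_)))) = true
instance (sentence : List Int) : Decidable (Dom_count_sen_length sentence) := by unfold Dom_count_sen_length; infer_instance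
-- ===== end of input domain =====

-- B replaces A's reverse-and-count-trailing-zeros-with-break by a single forward pass
-- recording (last nonzero index) + 1; objective: simpler, no reversed copy.

-- ===== PORT A =====
-- the for-loop with break: walk the reversed list, decrement sen_len on each zero, stop at the first nonzero
def countA_loop : List Int → Int → Int
  | [], n => n
  | w :: t, n => if w == 0 then countA_loop t (n - 1) else n

def count_sen_length (sentence : List Int) : Int :=
  let rev := (PySem.List.slice? sentence none none (-1)).getD []   -- sentence[::-1]
  countA_loop rev (rev.length : Int)

-- ===== PORT B =====
def count_sen_length_alt (sentence : List Int) : Int :=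
  (PySem.List.enumerate sentence).foldl
    (fun result p => if p.2 ≠ 0 then p.1 + 1 else result) 0

-- ===== PRECONDITION & SPEC =====
def Spec_count_sen_length (sentence : List Int) (out : Int) : Prop := out = count_sen_length_alt sentence
instance (sentence : List Int) (out : Int) : Decidable (Spec_count_sen_length sentence out) := by unfold Spec_count_sen_length; infer_instance

-- ===== CLAIM (what is proved, stated in full; the proofs are below) =====
def Claim_equal_count_sen_length : Prop := ∀ (sentence : List Int), Dom_count_sen_length sentence → Spec_count_sen_length sentence (count_sen_length sentence)

-- ===== LEMMAS AND PROOFS =====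

lemma countA_loop_eq (l : List Int) (n : Int) :
    countA_loop l n = n - ((l.takeWhile (fun w => w == 0)).length : Int) := by
  induction l generalizing n with
  | nil => simp [countA_loop]
  | cons w t ih =>
    by_cases h : w = 0
    · simp [countA_loop, h, ih]; ring
    · simp [countA_loop, h]

lemma altFold_eq (l : List Int) (s : Int) (acc : Int) :
    (PySem.List.enumerate l s).foldl (fun result p => if p.2 ≠ 0 then p.1 + 1 else result) acc
      = if (l.reverse.takeWhile (fun w => w == 0)).length = l.length then acc
        else s + (l.length : Int) - ((l.reverse.takeWhile (fun w => w == 0)).length : Int) := by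
  induction l using List.reverseRecOn generalizing acc with
  | nil => simp [PySem.List.enumerate]
  | append_singleton t x ih =>
    rw [PySem.List.enumerate_append, List.foldl_append]
    simp only [PySem.List.enumerate, List.foldl_cons, List.foldl_nil]
    rw [ih]
    have htw : (t.reverse.takeWhile (fun w => w == 0)).length ≤ t.length := by
      simpa using (List.takeWhile_sublist (p := fun w : Int => w == 0) (l := t.reverse)).length_le
    by_cases h : x = 0
    · simp [h]
      split_ifs <;> omega
    · simp [h]
      ring

-- ===== VERDICT (by name: the statement is the Claim_ definition above) =====
theorem count_sen_length_spec : Claim_equal_count_sen_length := by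
  intro sentence _
  show count_sen_length sentence = count_sen_length_alt sentence
  have hrev : (PySem.List.slice? sentence none none (-1)).getD [] = sentence.reverse := by
    rw [PySem.List.slice?_none_none_neg_one]; rfl
  rw [count_sen_length, count_sen_length_alt]
  rw [hrev, countA_loop_eq, altFold_eq]
  simp only [List.length_reverse]
  split_ifs with h <;> omega
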